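-- pv_equiv track=rewrite | github.com/jskim-research/PythonAlgorithm | programmers/level3/BestSet.py | solution
-- ===== SOURCE A (Python) =====
-- def solution(n, s):
--     if s < n:
--         return [-1]
--     answer = [s//n for i in range(n)]
--     remain = s % n
--     for i in range(n):
--         if remain <= 0:
--             break
--         answer[i] += 1
--         remain -= 1
--     return sorted(answer)
-- ===== SOURCE B (Python) =====
-- def solution(n, s):
--     if s < n:
--         return [-1]
--     out = []
--     while n > 0:
--         part = -(-s // n)   # largest remaining part = ceil(s/n)
--         out.append(part)
--         s -= part
--         n -= 1
--     out.reverse()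
--     return out
-- ===== Notes on version B (the rewrite author's own statement) =====
-- stated objective: alternative
-- what changed: B replaces A's quotient/remainder fill-increment-sort with a greedy loop that repeatedly peels off the largest remaining part ceil(s/n) (one ceiling division per element, no divmod precomputation and no sort), building the list in descending order and reversing it.
-- outside the precondition, e.g. on solution(0, 0): A raises ZeroDivisionError, B returns []
import Mathlib
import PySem

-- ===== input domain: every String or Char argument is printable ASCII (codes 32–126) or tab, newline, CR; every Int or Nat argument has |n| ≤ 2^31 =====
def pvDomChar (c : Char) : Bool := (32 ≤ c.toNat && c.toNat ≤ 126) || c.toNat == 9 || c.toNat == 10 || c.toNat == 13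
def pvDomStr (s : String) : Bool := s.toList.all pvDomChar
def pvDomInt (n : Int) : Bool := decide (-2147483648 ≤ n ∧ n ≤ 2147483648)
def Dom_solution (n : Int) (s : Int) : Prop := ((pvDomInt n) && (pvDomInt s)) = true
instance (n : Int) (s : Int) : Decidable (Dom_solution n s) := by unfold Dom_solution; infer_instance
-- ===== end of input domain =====

-- B replaces A's fill-increment-sort with a greedy loop peeling off the largest remaining part ceil(s/n)
-- each step (objective: alternative algorithm, not faster).

-- ===== PORT A =====
-- the 'for i in range(n): if remain <= 0: break; answer[i] += 1; remain -= 1' loop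
def pvLoopA : List Int → List Int → Int → List Int
  | answer, [], _ => answer
  | answer, i :: rest, remain =>
    if remain ≤ 0 then answer
    else pvLoopA (answer.modify i.toNat (· + 1)) rest (remain - 1)

def solution (n : Int) (s : Int) : List Int :=
  if s < n then [-1]
  else
    let answer := (PySem.List.pyRange 0 n 1).map (fun _ => PySem.Int.floordiv s n)
    let remain := PySem.Int.mod s n
    PySem.List.sorted (pvLoopA answer (PySem.List.pyRange 0 n 1) remain) (fun x => x) false

-- ===== PORT B =====
-- the 'while n > 0: part = -(-s // n); out.append(part); s -= part; n -= 1' loop of Source B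
def pvLoopB (n : Int) (s : Int) (out : List Int) : List Int :=
  if _h : 0 < n then
    let part := -(PySem.Int.floordiv (-s) n)
    pvLoopB (n - 1) (s - part) (out ++ [part])
  else out
termination_by n.toNat
decreasing_by omega

def solution_alt (n : Int) (s : Int) : List Int :=
  if s < n then [-1]
  else (pvLoopB n s []).reverse

-- ===== PRECONDITION & SPEC =====
-- Pre_ excludes exactly n = 0 with 0 ≤ s, where Python A raises ZeroDivisionError at 's % n' (B returns [] there).
def Pre_solution (n : Int) (s : Int) : Prop := n = 0 → s < 0
instance (n : Int) (s : Int) : Decidable (Pre_solution n s) := by unfold Pre_solution; infer_instance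
def pvWitness_solution : Int × Int := (3, 7)

def Spec_solution (n : Int) (s : Int) (out : List Int) : Prop := out = solution_alt n s
instance (n : Int) (s : Int) (out : List Int) : Decidable (Spec_solution n s out) := by unfold Spec_solution; infer_instance

-- ===== CLAIM (what is proved, stated in full; the proofs are below) =====
def Claim_equal_solution : Prop := ∀ (n : Int) (s : Int), Dom_solution n s → Pre_solution n s → Spec_solution n s (solution n s)

-- ===== LEMMAS AND PROOFS =====

lemma pv_modify_append (pre : List Int) (a : Int) (t : List Int) :
    (pre ++ a :: t).modify pre.length (· + 1) = pre ++ (a + 1) :: t := by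
  induction pre with
  | nil => simp [List.modify]
  | cons x xs ih =>
    simp only [List.modify] at ih ⊢
    simpa using ih

lemma pvLoopA_spec (q : Int) : ∀ (m : Nat) (pre : List Int) (r : Nat), r ≤ m →
    pvLoopA (pre ++ List.replicate m q)
      (PySem.List.pyRange (pre.length : Int) ((pre.length : Int) + (m : Int)) 1) (r : Int)
      = (pre ++ List.replicate r (q + 1)) ++ List.replicate (m - r) q := by
  intro m
  induction m with
  | zero =>
    intro pre r hr
    have hr0 : r = 0 := Nat.le_zero.mp hr
    subst hr0
    rw [PySem.List.pyRange_one_eq_nil (by omega)]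
    simp [pvLoopA]
  | succ k ih =>
    intro pre r hr
    rw [PySem.List.pyRange_one_cons (by push_cast; omega)]
    cases r with
    | zero =>
      simp [pvLoopA]
    | succ r' =>
      have hgt : ¬ ((r' + 1 : Nat) : Int) ≤ 0 := by push_cast; omega
      rw [pvLoopA]
      rw [if_neg hgt]
      have hmod : (pre ++ List.replicate (k + 1) q).modify
          ((pre.length : Int)).toNat (· + 1) = (pre ++ [q + 1]) ++ List.replicate k q := by
        rw [List.replicate_succ]
        simpa using pv_modify_append pre q (List.replicate k q)
      rw [hmod]
      have hlen : ((pre ++ [q + 1]).length : Int) = (pre.length : Int) + 1 := by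
        simp
      have hcast : ((r' + 1 : Nat) : Int) - 1 = ((r' : Nat) : Int) := by push_cast; ring
      have hrange : PySem.List.pyRange ((pre.length : Int) + 1)
            ((pre.length : Int) + ((k + 1 : Nat) : Int)) 1
          = PySem.List.pyRange (((pre ++ [q + 1]).length : Int))
            (((pre ++ [q + 1]).length : Int) + (k : Int)) 1 := by
        rw [hlen]; push_cast; ring_nf
      rw [hcast, hrange, ih (pre ++ [q + 1]) r' (by omega)]
      simp [List.replicate_succ, List.append_assoc]

lemma pv_sorted_two_blocks (q : Int) (a b : Nat) :
    PySem.List.sorted (List.replicate a (q + 1) ++ List.replicate b q) (fun x => x) false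
      = List.replicate b q ++ List.replicate a (q + 1) := by
  apply PySem.List.sorted_id_eq_of_perm_of_pairwise
  · exact List.perm_append_comm
  · rw [List.pairwise_append]
    refine ⟨List.pairwise_replicate.mpr (by omega), List.pairwise_replicate.mpr (by omega), ?_⟩
    intro x hx y hy
    rw [List.eq_of_mem_replicate hx, List.eq_of_mem_replicate hy]
    omega

lemma pvLoopB_spec (q : Int) : ∀ (m : Nat) (r : Nat), r ≤ m → ∀ (out : List Int),
    pvLoopB (m : Int) ((m : Int) * q + (r : Int)) out
      = (out ++ List.replicate r (q + 1)) ++ List.replicate (m - r) q := by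
  intro m
  induction m with
  | zero =>
    intro r hr out
    have hr0 : r = 0 := Nat.le_zero.mp hr
    subst hr0
    rw [pvLoopB]
    simp
  | succ k ih =>
    intro r hr out
    rw [pvLoopB]
    rw [dif_pos (by push_cast; omega)]
    cases r with
    | zero =>
      have hpart : -(PySem.Int.floordiv (-(((k + 1 : Nat) : Int) * q + ((0 : Nat) : Int)))
          ((k + 1 : Nat) : Int)) = q := by
        rw [PySem.Int.neg_floordiv_neg_eq_iff_of_pos (by push_cast; omega)]
        push_cast
        constructor <;> nlinarith
      rw [hpart]
      dsimp only
      have harg : ((k + 1 : Nat) : Int) - 1 = ((k : Nat) : Int) := by push_cast; ring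
      have hs : ((k + 1 : Nat) : Int) * q + ((0 : Nat) : Int) - q
          = ((k : Nat) : Int) * q + ((0 : Nat) : Int) := by push_cast; ring
      rw [harg, hs, ih 0 (by omega) (out ++ [q])]
      simp [List.replicate_succ, List.append_assoc]
    | succ r' =>
      have hpart : -(PySem.Int.floordiv (-(((k + 1 : Nat) : Int) * q + ((r' + 1 : Nat) : Int)))
          ((k + 1 : Nat) : Int)) = q + 1 := by
        rw [PySem.Int.neg_floordiv_neg_eq_iff_of_pos (by push_cast; omega)]
        push_cast at hr ⊢
        constructor <;> nlinarith
      rw [hpart]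
      dsimp only
      have harg : ((k + 1 : Nat) : Int) - 1 = ((k : Nat) : Int) := by push_cast; ring
      have hs : ((k + 1 : Nat) : Int) * q + ((r' + 1 : Nat) : Int) - (q + 1)
          = ((k : Nat) : Int) * q + ((r' : Nat) : Int) := by push_cast; ring
      rw [harg, hs, ih r' (by omega) (out ++ [q + 1])]
      have : k + 1 - (r' + 1) = k - r' := by omega
      simp [this, List.replicate_succ, List.append_assoc]

-- ===== VERDICT (by name: the statement is the Claim_ definition above) =====
theorem solution_spec : Claim_equal_solution := by
  intro n s _ hpre
  unfold Spec_solution solution solution_alt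
  by_cases hlt : s < n
  · simp [hlt]
  · rw [if_neg hlt, if_neg hlt]
    dsimp only
    rcases lt_trichotomy n 0 with hn | hn | hn
    · -- n < 0 : both sides are []
      have hrb := PySem.Int.mod_neg_bounds (a := s) (b := n) hn
      rw [PySem.List.pyRange_one_eq_nil (by omega)]
      rw [pvLoopB, dif_neg (by omega)]
      simp [pvLoopA, PySem.List.sorted]
    · exact absurd (hpre hn) (by omega)
    · -- 0 < n
      set q := PySem.Int.floordiv s n with hq
      set r := PySem.Int.mod s n with hr
      have hr0 : 0 ≤ r := PySem.Int.mod_nonneg s hn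
      have hrn : r < n := PySem.Int.mod_lt s hn
      have hmap : (PySem.List.pyRange 0 n 1).map (fun _ => q) = List.replicate n.toNat q := by
        rw [List.eq_replicate_iff]
        constructor
        · simp [PySem.List.length_pyRange_one]
        · intro b hb
          rcases List.mem_map.mp hb with ⟨_, _, h⟩
          exact h.symm
      rw [hmap]
      have hn' : ((n.toNat : Nat) : Int) = n := by omega
      have hr' : ((r.toNat : Nat) : Int) = r := by omega
      -- A side
      have hloopA := pvLoopA_spec q n.toNat ([] : List Int) r.toNat (by omega)
      simp only [List.length_nil, Nat.cast_zero, zero_add, List.nil_append] at hloopA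
      rw [hn', hr'] at hloopA
      rw [hloopA, pv_sorted_two_blocks]
      -- B side
      have hsum : q * n + r = s := PySem.Int.floordiv_mul_add_mod s n
      have hloopB := pvLoopB_spec q n.toNat r.toNat (by omega) ([] : List Int)
      rw [hn', hr'] at hloopB
      have hs' : n * q + r = s := by linarith [hsum]
      rw [hs'] at hloopB
      rw [hloopB]
      rw [List.nil_append, List.reverse_append, List.reverse_replicate, List.reverse_replicate]

theorem pv_wit : Dom_solution pvWitness_solution.1 pvWitness_solution.2 ∧
    Pre_solution pvWitness_solution.1 pvWitness_solution.2 := by decide
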